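-- pv_equiv track=rewrite | github.com/Macaberry/Rosalind_textbook_public | BA1L.py | PatternToNum
-- ===== SOURCE A (Python) =====
-- def PatternToNum(pattern):
--     base_table = {"A":0,"C":1,"G":2,"T":3}
--     decimal = sum(base_table[i] for i in pattern)
--     def decimal2quart(num):
--         if num == 0: return '0'
--         lst = []
--         while num > 0:
--             lst.append(str(num % 4))
--             num //= 4
--         return "".join(reversed(lst))
--     return decimal2quart(decimal)
-- ===== SOURCE B (Python) =====
-- def PatternToNum(pattern):
--     total = sum("ACGT".index(c) for c in pattern)
--
--     def conv(num):
--         return "" if num == 0 else conv(num // 4) + str(num % 4)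
--
--     return "0" if total == 0 else conv(total)
-- ===== Notes on version B (the rewrite author's own statement) =====
-- stated objective: simpler
-- what changed: The base values come from string position ("ACGT".index) instead of a dict lookup, and the base-4 conversion is a recursive helper emitting most-significant digits by concatenation instead of an LSB-first list built by a while loop and then reversed/joined.
import Mathlib
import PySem

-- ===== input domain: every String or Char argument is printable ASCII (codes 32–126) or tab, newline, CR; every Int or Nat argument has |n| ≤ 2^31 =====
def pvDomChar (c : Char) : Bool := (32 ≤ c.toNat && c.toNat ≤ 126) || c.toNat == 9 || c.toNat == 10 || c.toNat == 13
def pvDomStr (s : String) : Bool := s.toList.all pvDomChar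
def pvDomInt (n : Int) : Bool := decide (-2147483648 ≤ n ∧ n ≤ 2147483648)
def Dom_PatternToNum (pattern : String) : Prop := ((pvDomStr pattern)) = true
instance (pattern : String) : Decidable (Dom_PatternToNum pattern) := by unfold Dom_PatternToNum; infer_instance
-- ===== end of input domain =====

-- B replaces the dict with "ACGT".index and the while-loop/reverse/join base-4 conversion
-- with a recursive converter concatenating most-significant digits first (objective: simpler).

-- ===== PORT A =====
-- the while-loop of decimal2quart: appends str(num % 4), then num //= 4, while num > 0
def quartLoop (num : Int) (lst : List String) : List String :=
  if h : 0 < num then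
    quartLoop (PySem.Int.floordiv num 4) (lst ++ [PySem.Int.toStr (PySem.Int.mod num 4)])
  else lst
termination_by num.toNat
decreasing_by
  rw [PySem.Int.floordiv_eq_ediv_of_pos (by norm_num : (0:Int) < 4)]
  omega

def PatternToNum (pattern : String) : String :=
  let base_table : PySem.Dict String Int :=
    PySem.Dict.ofList [("A", 0), ("C", 1), ("G", 2), ("T", 3)]
  -- base_table[i]: the KeyError case (i not a key) is excluded by Pre_, so getD 0 is exact there
  let decimal : Int :=
    pattern.toList.foldl (fun s c => s + (base_table.get? (String.singleton c)).getD 0) 0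
  -- decimal2quart decimal
  if decimal = 0 then "0"
  else PySem.Str.join "" (quartLoop decimal []).reverse

-- ===== PORT B =====
-- conv: Python's base case is num == 0; the guard 0 < num only makes it total in Lean
-- (conv is only ever called with num ≥ 0, where the two guards agree)
def convB (num : Int) : String :=
  if h : 0 < num then
    convB (PySem.Int.floordiv num 4) ++ PySem.Int.toStr (PySem.Int.mod num 4)
  else ""
termination_by num.toNat
decreasing_by
  rw [PySem.Int.floordiv_eq_ediv_of_pos (by norm_num : (0:Int) < 4)]
  omega

def PatternToNum_alt (pattern : String) : String :=
  -- "ACGT".index(c): ValueError (c absent) is excluded by Pre_; there find = index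
  let total : Int :=
    pattern.toList.foldl (fun s c => s + PySem.Str.find "ACGT" (String.singleton c)) 0
  if total = 0 then "0" else convB total

-- ===== PRECONDITION & SPEC =====
-- Pre_ excludes patterns containing a character other than A,C,G,T: there A raises
-- KeyError (dict lookup) and B raises ValueError (str.index).
def Pre_PatternToNum (pattern : String) : Prop :=
  (pattern.toList.all (['A', 'C', 'G', 'T'].contains ·)) = true
instance (pattern : String) : Decidable (Pre_PatternToNum pattern) := by
  unfold Pre_PatternToNum; infer_instance

def pvWitness_PatternToNum : String := "GATTACA"

def Spec_PatternToNum (pattern : String) (out : String) : Prop := out = PatternToNum_alt pattern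
instance (pattern : String) (out : String) : Decidable (Spec_PatternToNum pattern out) := by
  unfold Spec_PatternToNum; infer_instance

-- ===== CLAIM (what is proved, stated in full; the proofs are below) =====
def Claim_equal_PatternToNum : Prop :=
  ∀ (pattern : String), Dom_PatternToNum pattern → Pre_PatternToNum pattern →
    Spec_PatternToNum pattern (PatternToNum pattern)

-- ===== LEMMAS AND PROOFS =====

-- joining with "" an (xs ++ [d]) appends d's characters
lemma joinE (xs : List (List Char)) (d : List Char) :
    PySem.Chars.join [] (xs ++ [d]) = PySem.Chars.join [] xs ++ d := by
  induction xs with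
  | nil => simp [PySem.Chars.join_nil, PySem.Chars.join_singleton]
  | cons x rest ih =>
    cases rest with
    | nil => simp [PySem.Chars.join_singleton, PySem.Chars.join_cons_cons]
    | cons y t =>
      simp only [List.cons_append] at ih ⊢
      rw [PySem.Chars.join_cons_cons, ih, PySem.Chars.join_cons_cons]
      simp

-- accumulator lemma for A's while loop
lemma quartLoop_acc (num : Int) : ∀ lst, quartLoop num lst = lst ++ quartLoop num [] := by
  induction hk : num.toNat using Nat.strong_induction_on generalizing num with
  | _ k ih =>
    intro lst
    by_cases h0 : 0 < num
    · conv_lhs => rw [quartLoop]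
      conv_rhs => rw [quartLoop]
      simp only [h0, dif_pos, List.nil_append]
      have hlt : (PySem.Int.floordiv num 4).toNat < k := by
        rw [PySem.Int.floordiv_eq_ediv_of_pos (show (0:Int) < 4 by norm_num)]; omega
      rw [ih _ hlt _ rfl (lst ++ [PySem.Int.toStr (PySem.Int.mod num 4)]),
        ih _ hlt _ rfl [PySem.Int.toStr (PySem.Int.mod num 4)]]
      simp
    · conv_lhs => rw [quartLoop]
      conv_rhs => rw [quartLoop]
      simp [h0]

-- the joined, reversed digit list of A's loop equals B's recursive converter (num > 0)
lemma loop_eq_conv (num : Int) (h : 0 < num) :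
    PySem.Str.join "" (quartLoop num []).reverse = convB num := by
  induction hk : num.toNat using Nat.strong_induction_on generalizing num with
  | _ k ih =>
    rw [quartLoop, convB]
    simp only [h, dif_pos, List.nil_append]
    set q := PySem.Int.floordiv num 4 with hqdef
    have hq4 : q = num / 4 := by
      rw [hqdef, PySem.Int.floordiv_eq_ediv_of_pos (show (0:Int) < 4 by norm_num)]
    rw [quartLoop_acc]
    apply String.toList_inj.mp
    rw [PySem.Str.toList_join]
    simp only [List.reverse_cons, List.singleton_append, List.map_append, List.map_reverse,
      List.map_cons, List.map_nil]
    rw [show ("" : String).toList = ([] : List Char) from rfl, joinE]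
    by_cases hq : 0 < q
    · have hlt : q.toNat < k := by omega
      have htl := congrArg String.toList (ih _ hlt _ hq rfl)
      rw [PySem.Str.toList_join] at htl
      simp only [List.map_reverse] at htl
      rw [show ("" : String).toList = ([] : List Char) from rfl] at htl
      simp [String.toList_append, htl]
    · rw [quartLoop]
      simp [hq, PySem.Chars.join_nil, convB]

-- under Pre_, the dict lookup equals "ACGT".index for each character
lemma step_eq (c : Char) (hc : c ∈ (['A', 'C', 'G', 'T'] : List Char)) :
    ((PySem.Dict.ofList [("A", (0:Int)), ("C", 1), ("G", 2), ("T", 3)]).get?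
        (String.singleton c)).getD 0
      = PySem.Str.find "ACGT" (String.singleton c) := by
  fin_cases hc <;> decide

lemma sums_eq (pattern : String) (hp : ∀ c ∈ pattern.toList, c ∈ (['A', 'C', 'G', 'T'] : List Char)) :
    pattern.toList.foldl
        (fun s c => s + ((PySem.Dict.ofList [("A", (0:Int)), ("C", 1), ("G", 2), ("T", 3)]).get?
          (String.singleton c)).getD 0) 0
      = pattern.toList.foldl (fun s c => s + PySem.Str.find "ACGT" (String.singleton c)) 0 := by
  apply PySem.List.foldl_congr_mem
  intro s c hc
  rw [step_eq c (hp c hc)]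

lemma find_nonneg_of_mem (c : Char) (hc : c ∈ (['A', 'C', 'G', 'T'] : List Char)) :
    0 ≤ PySem.Str.find "ACGT" (String.singleton c) := by
  fin_cases hc <;> decide

lemma foldl_find_nonneg (l : List Char)
    (hl : ∀ c ∈ l, 0 ≤ PySem.Str.find "ACGT" (String.singleton c)) :
    ∀ i : Int, 0 ≤ i →
      0 ≤ l.foldl (fun s c => s + PySem.Str.find "ACGT" (String.singleton c)) i := by
  induction l with
  | nil => intro i hi; simpa
  | cons c rest ih =>
    intro i hi
    simp only [List.foldl_cons]
    exact ih (fun d hd => hl d (List.mem_cons_of_mem _ hd)) _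
      (by have := hl c (List.mem_cons_self ..); omega)

-- ===== VERDICT (by name: the statement is the Claim_ definition above) =====
theorem PatternToNum_spec : Claim_equal_PatternToNum := by
  intro pattern _ hpre
  have hmem : ∀ c ∈ pattern.toList, c ∈ (['A', 'C', 'G', 'T'] : List Char) := by
    simpa [Pre_PatternToNum] using hpre
  show PatternToNum pattern = PatternToNum_alt pattern
  simp only [PatternToNum, PatternToNum_alt]
  rw [sums_eq pattern hmem]
  set t := pattern.toList.foldl (fun s c => s + PySem.Str.find "ACGT" (String.singleton c)) 0
    with ht
  by_cases h0 : t = 0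
  · simp [h0]
  · have hnn : 0 ≤ t := by
      rw [ht]
      exact foldl_find_nonneg _ (fun c hc => find_nonneg_of_mem c (hmem c hc)) 0 le_rfl
    rw [if_neg h0, if_neg h0]
    exact loop_eq_conv t (lt_of_le_of_ne hnn (Ne.symm h0))
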